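-- pv_equiv track=rewrite | github.com/vlavlaz/PyEge | DasAlgos/ege/task14/type2/_6.py | to49
-- ===== SOURCE A (Python) =====
-- def to49(x1):
--     alf = "0123456789abcdefghijklmnopqrstuvwxyzABCDEFGHIJKLM"
--     res = ""
--     x = abs(x1)
--     while x > 0:
--         res += alf[x%49]
--         x//=49
--     return res[::-1]
-- ===== SOURCE B (Python) =====
-- def to49(x1):
--     alf = "0123456789abcdefghijklmnopqrstuvwxyzABCDEFGHIJKLM"
--     x = abs(x1)
--     if x == 0:
--         return ""
--     # find the largest power of 49 not exceeding x
--     p = 1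
--     while p <= x // 49:
--         p *= 49
--     # extract digits most-significant-first by dividing by decreasing powers
--     out = []
--     while p > 0:
--         out.append(alf[x // p])
--         x %= p
--         p //= 49
--     return "".join(out)
-- ===== Notes on version B (the rewrite author's own statement) =====
-- stated objective: alternative
-- what changed: Instead of A's least-significant-first digit loop followed by a string reversal, B first finds the largest power of 49 not exceeding |x1| and then emits digits most-significant-first by dividing by decreasing powers, so no reversal is needed.
import Mathlib
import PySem

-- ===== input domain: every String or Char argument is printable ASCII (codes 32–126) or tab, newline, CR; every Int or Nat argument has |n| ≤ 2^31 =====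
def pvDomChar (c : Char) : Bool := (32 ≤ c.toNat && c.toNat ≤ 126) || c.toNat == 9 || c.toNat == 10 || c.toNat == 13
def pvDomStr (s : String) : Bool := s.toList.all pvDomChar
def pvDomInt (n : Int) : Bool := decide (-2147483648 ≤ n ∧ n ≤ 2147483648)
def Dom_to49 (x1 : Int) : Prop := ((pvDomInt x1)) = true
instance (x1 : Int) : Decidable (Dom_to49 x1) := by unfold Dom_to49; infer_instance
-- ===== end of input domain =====

-- B replaces A's least-significant-first accumulate-then-reverse loop by a different
-- algorithm: it first finds the largest power of 49 not exceeding |x1|, then emits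
-- digits most-significant-first by dividing by decreasing powers (objective: alternative).

-- ===== PORT A =====
def pvAlfA : List Char := "0123456789abcdefghijklmnopqrstuvwxyzABCDEFGHIJKLM".toList

-- the 'while x > 0' loop of A, carrying (x, res); alf[x%49] is always in range (0 ≤ x%49 < 49)
def to49Loop (x : Int) (res : List Char) : List Char :=
  if _h : 0 < x then
    to49Loop (PySem.Int.floordiv x 49) (res ++ [PySem.List.pyGetD pvAlfA (PySem.Int.mod x 49) ' '])
  else res
termination_by x.toNat
decreasing_by
  rw [PySem.Int.floordiv_eq_ediv_of_pos (by omega)]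
  omega

-- res[::-1] is List.reverse (PySem.Str.slice?_none_none_neg_one)
def to49 (x1 : Int) : String := String.ofList ((to49Loop |x1| []).reverse)

-- ===== PORT B =====
def pvAlfB : List Char := "0123456789abcdefghijklmnopqrstuvwxyzABCDEFGHIJKLM".toList

-- B's first loop 'while p <= x // 49: p *= 49'; the extra '0 < p' in the guard only
-- serves termination — B only ever calls it with p = 1 > 0 and the loop keeps p > 0.
def to49PowB (x p : Int) : Int :=
  if _h : 0 < p ∧ p ≤ PySem.Int.floordiv x 49 then to49PowB x (p * 49) else p
termination_by (PySem.Int.floordiv x 49 + 1 - p).toNat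
decreasing_by omega

-- B's second loop 'while p > 0: out.append(alf[x // p]); x %= p; p //= 49'
def to49LoopB (x p : Int) (out : List Char) : List Char :=
  if _h : 0 < p then
    to49LoopB (PySem.Int.mod x p) (PySem.Int.floordiv p 49)
      (out ++ [PySem.List.pyGetD pvAlfB (PySem.Int.floordiv x p) ' '])
  else out
termination_by p.toNat
decreasing_by
  rw [PySem.Int.floordiv_eq_ediv_of_pos (by omega)]
  omega

def to49_alt (x1 : Int) : String :=
  if |x1| == 0 then ""
  else String.ofList (to49LoopB |x1| (to49PowB |x1| 1) [])

-- ===== PRECONDITION & SPEC =====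
def Spec_to49 (x1 : Int) (out : String) : Prop := out = to49_alt x1
instance (x1 : Int) (out : String) : Decidable (Spec_to49 x1 out) := by unfold Spec_to49; infer_instance

-- ===== CLAIM (what is proved, stated in full; the proofs are below) =====
def Claim_equal_to49 : Prop := ∀ (x1 : Int), Dom_to49 x1 → Spec_to49 x1 (to49 x1)

-- ===== LEMMAS AND PROOFS =====

-- canonical least-significant-first recursion, the common reference point of both ports
def pvRecF (x : Int) : List Char :=
  if _h : x ≤ 0 then []
  else pvRecF (PySem.Int.floordiv x 49) ++ [PySem.List.pyGetD pvAlfA (PySem.Int.mod x 49) ' ']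
termination_by x.toNat
decreasing_by
  rw [PySem.Int.floordiv_eq_ediv_of_pos (by omega)]
  omega

-- the fixed-width (k+1 digits) most-significant-first digit list
def pvDigits : Nat → Int → List Char
  | 0, x => [PySem.List.pyGetD pvAlfA x ' ']
  | k + 1, x => PySem.List.pyGetD pvAlfA (x / 49 ^ (k + 1)) ' ' :: pvDigits k (x % 49 ^ (k + 1))

-- A's loop accumulator factors out: the digits already produced are a prefix.
theorem to49Loop_shift (x : Int) (res : List Char) :
    to49Loop x res = res ++ to49Loop x [] := by
  by_cases h : 0 < x
  · have hL : ∀ r : List Char, to49Loop x r =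
        to49Loop (PySem.Int.floordiv x 49)
          (r ++ [PySem.List.pyGetD pvAlfA (PySem.Int.mod x 49) ' ']) := by
      intro r; rw [to49Loop]; simp only [dif_pos h]
    rw [hL res, hL [],
      to49Loop_shift (PySem.Int.floordiv x 49)
        (res ++ [PySem.List.pyGetD pvAlfA (PySem.Int.mod x 49) ' ']),
      to49Loop_shift (PySem.Int.floordiv x 49)
        ([] ++ [PySem.List.pyGetD pvAlfA (PySem.Int.mod x 49) ' '])]
    simp
  · have hstop : ∀ r : List Char, to49Loop x r = r := by
      intro r; rw [to49Loop]; simp [h]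
    rw [hstop, hstop]; simp
termination_by x.toNat
decreasing_by
  all_goals rw [PySem.Int.floordiv_eq_ediv_of_pos (by omega)]; omega

-- the reversed digit list of A's loop is exactly the most-significant-first recursion
theorem to49Loop_reverse_eq_rec (x : Int) :
    (to49Loop x []).reverse = pvRecF x := by
  by_cases h : 0 < x
  · have hL : to49Loop x [] =
        to49Loop (PySem.Int.floordiv x 49)
          ([] ++ [PySem.List.pyGetD pvAlfA (PySem.Int.mod x 49) ' ']) := by
      rw [to49Loop]; simp only [dif_pos h]
    rw [hL, to49Loop_shift, pvRecF]
    simp only [dif_neg (by omega : ¬ x ≤ 0), List.nil_append]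
    rw [List.reverse_append, to49Loop_reverse_eq_rec (PySem.Int.floordiv x 49)]
    simp
  · rw [to49Loop, pvRecF]
    simp [h, (by omega : x ≤ 0)]
termination_by x.toNat
decreasing_by
  rw [PySem.Int.floordiv_eq_ediv_of_pos (by omega)]
  omega

-- (x % (49·c)) / 49 = (x / 49) % c : the euclidean "carry" identity used below
theorem pv_emod_mul_ediv (x c : Int) : x % (49 * c) / 49 = x / 49 % c := by
  have h2 : x / (49 * c) = x / 49 / c := (Int.ediv_ediv_of_nonneg (by norm_num)).symm
  rw [Int.emod_def x (49 * c), h2,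
    show x - 49 * c * (x / 49 / c) = x + -(c * (x / 49 / c)) * 49 by ring,
    Int.add_mul_ediv_right _ _ (by norm_num : (49 : Int) ≠ 0), Int.emod_def]
  ring

-- peeling the LEAST significant digit off the fixed-width digit list
theorem pvDigits_succ (k : Nat) (x : Int) :
    pvDigits (k + 1) x =
      pvDigits k (x / 49) ++ [PySem.List.pyGetD pvAlfA (x % 49) ' '] := by
  induction k generalizing x with
  | zero => simp [pvDigits]
  | succ k ih =>
    have hdvd : (49 : Int) ∣ 49 ^ (k + 2) := dvd_pow_self 49 (by omega)
    have e1 : x % 49 ^ (k + 2) % 49 = x % 49 := Int.emod_emod_of_dvd x hdvd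
    have e2 : x % 49 ^ (k + 2) / 49 = x / 49 % 49 ^ (k + 1) := by
      have : (49 : Int) ^ (k + 2) = 49 * 49 ^ (k + 1) := by ring
      rw [this, pv_emod_mul_ediv]
    have e3 : x / 49 / 49 ^ (k + 1) = x / 49 ^ (k + 2) := by
      rw [Int.ediv_ediv_of_nonneg (by norm_num)]
      norm_num [show (49 : Int) * 49 ^ (k + 1) = 49 ^ (k + 2) by ring]
    show PySem.List.pyGetD pvAlfA (x / 49 ^ (k + 2)) ' ' :: pvDigits (k + 1) (x % 49 ^ (k + 2)) = _
    rw [ih (x % 49 ^ (k + 2)), e1, e2]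
    show _ = PySem.List.pyGetD pvAlfA (x / 49 / 49 ^ (k + 1)) ' ' :: _
    rw [e3]
    simp

-- B's second loop, started at the power 49^k, produces the k+1 fixed-width digits
theorem to49LoopB_eq_digits (k : Nat) (x : Int) (out : List Char) :
    to49LoopB x ((49 : Int) ^ k) out = out ++ pvDigits k x := by
  induction k generalizing x out with
  | zero =>
    rw [to49LoopB]
    simp only [pow_zero, dif_pos (by norm_num : (0 : Int) < 1)]
    rw [to49LoopB]
    have h2 : PySem.Int.floordiv x 1 = x := by
      rw [PySem.Int.floordiv_eq_ediv_of_pos (by norm_num)]; exact Int.ediv_one x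
    have h3 : PySem.Int.floordiv 1 49 = 0 := by decide
    rw [h2, h3, show pvAlfB = pvAlfA from rfl]
    simp only [dif_neg (by norm_num : ¬ (0:Int) < 0)]
    simp [pvDigits]
  | succ k ih =>
    have hp : (0 : Int) < 49 ^ (k + 1) := by positivity
    rw [to49LoopB]
    simp only [dif_pos hp]
    have h1 : PySem.Int.mod x (49 ^ (k + 1)) = x % 49 ^ (k + 1) :=
      PySem.Int.mod_eq_emod_of_pos hp
    have h2 : PySem.Int.floordiv x (49 ^ (k + 1)) = x / 49 ^ (k + 1) :=
      PySem.Int.floordiv_eq_ediv_of_pos hp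
    have h3 : PySem.Int.floordiv ((49 : Int) ^ (k + 1)) 49 = 49 ^ k := by
      rw [PySem.Int.floordiv_eq_ediv_of_pos (by norm_num),
        show (49 : Int) ^ (k + 1) = 49 ^ k * 49 by ring]
      exact Int.mul_ediv_cancel _ (by norm_num)
    rw [h1, h2, h3, ih (x % 49 ^ (k + 1)), show pvAlfB = pvAlfA from rfl]
    simp [pvDigits]

-- when 49^k ≤ x < 49^(k+1) the canonical recursion gives exactly those k+1 digits
theorem pvRecF_eq_digits (k : Nat) (x : Int)
    (hle : (49 : Int) ^ k ≤ x) (hlt : x < 49 ^ (k + 1)) :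
    pvRecF x = pvDigits k x := by
  induction k generalizing x with
  | zero =>
    have hx : (1 : Int) ≤ x := by simpa using hle
    have hx49 : x < 49 := by simpa using hlt
    rw [pvRecF]
    simp only [dif_neg (by omega : ¬ x ≤ 0)]
    have h1 : PySem.Int.floordiv x 49 = 0 := by
      rw [PySem.Int.floordiv_eq_ediv_of_pos (by norm_num)]
      exact Int.ediv_eq_zero_of_lt (by omega) hx49
    have h2 : PySem.Int.mod x 49 = x := by
      rw [PySem.Int.mod_eq_emod_of_pos (by norm_num)]
      exact Int.emod_eq_of_lt (by omega) hx49
    rw [h1, h2, pvRecF]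
    simp [pvDigits]
  | succ k ih =>
    have hxpos : (0 : Int) < x := lt_of_lt_of_le (by positivity) hle
    rw [pvRecF]
    simp only [dif_neg (by omega : ¬ x ≤ 0)]
    have h1 : PySem.Int.floordiv x 49 = x / 49 :=
      PySem.Int.floordiv_eq_ediv_of_pos (by norm_num)
    have h2 : PySem.Int.mod x 49 = x % 49 :=
      PySem.Int.mod_eq_emod_of_pos (by norm_num)
    have hle' : (49 : Int) ^ k ≤ x / 49 := by
      rw [Int.le_ediv_iff_mul_le (by norm_num)]
      calc (49 : Int) ^ k * 49 = 49 ^ (k + 1) := by ring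
        _ ≤ x := hle
    have hlt' : x / 49 < 49 ^ (k + 1) := by
      rw [Int.ediv_lt_iff_lt_mul (by norm_num)]
      calc x < 49 ^ (k + 2) := hlt
        _ = 49 ^ (k + 1) * 49 := by ring
    rw [h1, h2, ih (x / 49) hle' hlt', ← pvDigits_succ]

-- B's first loop returns the largest power of 49 not exceeding x
theorem to49PowB_spec (p x : Int) (j : Nat) (hpj : p = 49 ^ j) (hpx : p ≤ x) :
    ∃ m : Nat, to49PowB x p = 49 ^ m ∧ (49 : Int) ^ m ≤ x ∧ x < 49 ^ (m + 1) := by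
  have hp : (0 : Int) < p := hpj ▸ (by positivity)
  have hfd : PySem.Int.floordiv x 49 = x / 49 :=
    PySem.Int.floordiv_eq_ediv_of_pos (by norm_num)
  by_cases h : 0 < p ∧ p ≤ PySem.Int.floordiv x 49
  · rw [to49PowB, dif_pos h]
    refine to49PowB_spec (p * 49) x (j + 1) (by rw [hpj]; ring) ?_
    have hd : p ≤ x / 49 := hfd ▸ h.2
    rw [← Int.le_ediv_iff_mul_le (by norm_num : (0:Int) < 49)]
    exact hd
  · rw [to49PowB, dif_neg h]
    refine ⟨j, hpj, hpj ▸ hpx, ?_⟩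
    have hlt : x / 49 < p := by
      by_contra hc
      exact h ⟨hp, hfd ▸ (by omega)⟩
    have hxp : x < p * 49 := by
      rw [← Int.ediv_lt_iff_lt_mul (by norm_num : (0:Int) < 49)]; exact hlt
    calc x < p * 49 := hxp
      _ = 49 ^ (j + 1) := by rw [hpj]; ring
termination_by (PySem.Int.floordiv x 49 + 1 - p).toNat
decreasing_by omega

-- ===== VERDICT (by name: the statement is the Claim_ definition above) =====
theorem to49_spec : Claim_equal_to49 := by
  intro x1 _
  unfold Spec_to49 to49 to49_alt
  by_cases hz : |x1| = 0
  · have hloop : to49Loop 0 [] = [] := by rw [to49Loop]; simp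
    simp [hz, hloop]
  · have hx : (1 : Int) ≤ |x1| := by have := abs_nonneg x1; omega
    obtain ⟨m, hpow, hle, hlt⟩ := to49PowB_spec 1 |x1| 0 (by norm_num) hx
    rw [if_neg (by simpa using hz), hpow, to49LoopB_eq_digits m |x1| [],
      ← pvRecF_eq_digits m |x1| hle hlt, ← to49Loop_reverse_eq_rec]
    simp
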